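-- pv_equiv track=rewrite | github.com/tayl0r89/aoc-2024 | day14/solution.py | ext_pos_to_string
-- ===== SOURCE A (Python) =====
-- def ext_pos_to_string(positions, min_x, max_x, min_y, max_y):
--     lines = []
--     for y in range(min_y, max_y):
--         line = []
--         for x in range(min_x, max_x):
--             if (x,y) in positions:
--                 line.append("x")
--             else:
--                 line.append(".")
--         lines.append("".join(line))
--     return lines
-- ===== SOURCE B (Python) =====
-- def ext_pos_to_string(positions, min_x, max_x, min_y, max_y):
--     width = max_x - min_x
--     rows = {}
--     for (x, y) in positions:
--         if min_x <= x < max_x and min_y <= y < max_y: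
--             rows.setdefault(y, []).append(x)
--     lines = []
--     for y in range(min_y, max_y):
--         row = ["."] * width
--         for x in rows.get(y, []):
--             row[x - min_x] = "x"
--         lines.append("".join(row))
--     return lines
-- ===== Notes on version B (the rewrite author's own statement) =====
-- stated objective: alternative
-- what changed: Instead of testing membership of every grid cell in the positions list, B builds a dict grouping in-window x-coordinates by their y in one pass, then renders each row by scattering 'x' into a pre-filled '.' row by direct index assignment.
import Mathlib
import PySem

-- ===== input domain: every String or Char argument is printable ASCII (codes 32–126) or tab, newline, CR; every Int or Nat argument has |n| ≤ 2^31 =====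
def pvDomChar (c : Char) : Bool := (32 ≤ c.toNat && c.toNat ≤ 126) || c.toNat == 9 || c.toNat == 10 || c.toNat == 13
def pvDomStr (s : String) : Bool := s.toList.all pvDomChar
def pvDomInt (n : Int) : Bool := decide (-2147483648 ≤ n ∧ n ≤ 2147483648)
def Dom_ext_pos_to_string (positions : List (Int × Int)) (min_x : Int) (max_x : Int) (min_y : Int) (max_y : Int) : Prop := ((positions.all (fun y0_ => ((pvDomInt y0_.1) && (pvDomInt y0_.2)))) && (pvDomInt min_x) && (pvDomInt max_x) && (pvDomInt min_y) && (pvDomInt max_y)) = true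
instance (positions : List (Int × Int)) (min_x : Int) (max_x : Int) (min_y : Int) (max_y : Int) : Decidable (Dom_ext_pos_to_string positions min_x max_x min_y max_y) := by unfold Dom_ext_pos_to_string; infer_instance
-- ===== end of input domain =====

-- B replaces A's per-cell membership scan by a one-pass dict grouping in-window
-- x's by y, then scatters 'x' into pre-filled rows by index assignment (alternative).

-- ===== PORT A =====
def ext_pos_to_string (positions : List (Int × Int)) (min_x : Int) (max_x : Int) (min_y : Int) (max_y : Int) : List String :=
  (PySem.List.pyRange min_y max_y 1).foldl (fun lines y =>
    let line := (PySem.List.pyRange min_x max_x 1).foldl (fun line x =>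
      if (x, y) ∈ positions then line ++ ['x'] else line ++ ['.']) ([] : List Char)
    lines ++ [String.ofList line]) []

-- ===== PORT B =====
def ext_pos_to_string_alt (positions : List (Int × Int)) (min_x : Int) (max_x : Int) (min_y : Int) (max_y : Int) : List String :=
  let width := max_x - min_x
  -- rows.setdefault(y, []).append(x)  ==  rows[y] = rows.get(y, []) + [x]  ==  Dict.modify
  let rows : PySem.Dict Int (List Int) := positions.foldl (fun rows p =>
    if min_x ≤ p.1 ∧ p.1 < max_x ∧ min_y ≤ p.2 ∧ p.2 < max_y then
      rows.modify p.2 [] (· ++ [p.1]) else rows) PySem.Dict.empty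
  (PySem.List.pyRange min_y max_y 1).foldl (fun lines y =>
    let row := (rows.getD y []).foldl (fun row x => row.set (x - min_x).toNat 'x')
      (List.replicate width.toNat '.')
    lines ++ [String.ofList row]) []

-- ===== PRECONDITION & SPEC =====
def Spec_ext_pos_to_string (positions : List (Int × Int)) (min_x : Int) (max_x : Int) (min_y : Int) (max_y : Int) (out : List String) : Prop := out = ext_pos_to_string_alt positions min_x max_x min_y max_y
instance (positions : List (Int × Int)) (min_x : Int) (max_x : Int) (min_y : Int) (max_y : Int) (out : List String) : Decidable (Spec_ext_pos_to_string positions min_x max_x min_y max_y out) := by unfold Spec_ext_pos_to_string; infer_instance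

-- ===== CLAIM (what is proved, stated in full; the proofs are below) =====
def Claim_equal_ext_pos_to_string : Prop := ∀ (positions : List (Int × Int)) (min_x : Int) (max_x : Int) (min_y : Int) (max_y : Int), Dom_ext_pos_to_string positions min_x max_x min_y max_y → Spec_ext_pos_to_string positions min_x max_x min_y max_y (ext_pos_to_string positions min_x max_x min_y max_y)

-- ===== LEMMAS AND PROOFS =====

-- The grouping pass: the dict's entry at a y inside the window lists, in order,
-- exactly the first components of the in-window positions whose second component is y.
lemma build_getD (min_x max_x min_y max_y : Int) (ps : List (Int × Int))
    (d : PySem.Dict Int (List Int)) (y : Int) (hy1 : min_y ≤ y) (hy2 : y < max_y) :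
    (ps.foldl (fun rows p =>
      if min_x ≤ p.1 ∧ p.1 < max_x ∧ min_y ≤ p.2 ∧ p.2 < max_y then
        rows.modify p.2 [] (· ++ [p.1]) else rows) d).getD y []
    = d.getD y [] ++ (ps.filter (fun p => decide (p.2 = y ∧ min_x ≤ p.1 ∧ p.1 < max_x))).map Prod.fst := by
  induction ps generalizing d with
  | nil => simp
  | cons p ps ih =>
    simp only [List.foldl_cons]
    rw [ih]
    by_cases hpy : p.2 = y
    · by_cases hx : min_x ≤ p.1 ∧ p.1 < max_x
      · rw [if_pos ⟨hx.1, hx.2, by omega, by omega⟩]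
        rw [List.filter_cons_of_pos (by simp [hpy, hx.1, hx.2])]
        rw [hpy, PySem.Dict.getD_modify_self]
        simp
      · rw [if_neg (by omega), List.filter_cons_of_neg (by simp [hpy]; omega)]
    · rw [List.filter_cons_of_neg (by simp [hpy])]
      split_ifs with hc
      · rw [PySem.Dict.getD_modify_of_ne _ _ _ (fun h => hpy h.symm)]
      · rfl

-- The scatter pass, pointwise: cell i is 'x' iff min_x + i occurs in xs.
lemma scatter_getElem? (min_x max_x : Int) (xs : List Int)
    (hxs : ∀ x ∈ xs, min_x ≤ x ∧ x < max_x) (r : List Char)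
    (i : Nat) (hlen : r.length = (max_x - min_x).toNat) (hi : i < (max_x - min_x).toNat) :
    (xs.foldl (fun row x => row.set (x - min_x).toNat 'x') r)[i]?
    = if (min_x + (i : Int)) ∈ xs then some 'x' else r[i]? := by
  induction xs generalizing r with
  | nil => simp
  | cons x xs ih =>
    simp only [List.foldl_cons]
    obtain ⟨hx1, hx2⟩ := hxs x (List.mem_cons_self ..)
    rw [ih (fun z hz => hxs z (List.mem_cons_of_mem _ hz)) _ (by simp [hlen])]
    by_cases hmem : (min_x + (i : Int)) ∈ xs
    · simp [hmem, List.mem_cons]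
    · rw [if_neg hmem]
      by_cases hxi : x = min_x + (i : Int)
      · rw [hxi, if_pos (List.mem_cons_self ..)]
        have ht : (min_x + (i : Int) - min_x).toNat = i := by omega
        rw [ht, List.getElem?_set_self (by omega)]
      · rw [if_neg (show (min_x + (i : Int)) ∉ x :: xs from by
          simp [hmem]; exact fun h => hxi h.symm)]
        have hne : (x - min_x).toNat ≠ i := by omega
        exact List.getElem?_set_ne hne

-- Membership translation between the grouped row list and the raw positions list.
lemma mem_grouped (min_x max_x : Int) (ps : List (Int × Int)) (y v : Int)
    (hv1 : min_x ≤ v) (hv2 : v < max_x) :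
    v ∈ (ps.filter (fun p => decide (p.2 = y ∧ min_x ≤ p.1 ∧ p.1 < max_x))).map Prod.fst
    ↔ (v, y) ∈ ps := by
  simp only [List.mem_map, List.mem_filter, decide_eq_true_eq]
  constructor
  · rintro ⟨p, ⟨hp, hpy, _, _⟩, hfst⟩
    have : p = (v, y) := Prod.ext_iff.mpr ⟨hfst, hpy⟩
    exact this ▸ hp
  · intro h
    exact ⟨(v, y), ⟨h, rfl, hv1, hv2⟩, rfl⟩

-- A's row equals B's row, for every y inside the rendered window.
lemma row_eq (positions : List (Int × Int)) (min_x max_x min_y max_y y : Int)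
    (hy1 : min_y ≤ y) (hy2 : y < max_y) :
    (PySem.List.pyRange min_x max_x 1).foldl (fun line x =>
      if (x, y) ∈ positions then line ++ ['x'] else line ++ ['.']) ([] : List Char)
    = ((positions.foldl (fun rows p =>
        if min_x ≤ p.1 ∧ p.1 < max_x ∧ min_y ≤ p.2 ∧ p.2 < max_y then
          rows.modify p.2 [] (· ++ [p.1]) else rows) PySem.Dict.empty).getD y []).foldl
        (fun row x => row.set (x - min_x).toNat 'x')
        (List.replicate (max_x - min_x).toNat '.') := by
  have hA : (PySem.List.pyRange min_x max_x 1).foldl (fun line x =>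
      if (x, y) ∈ positions then line ++ ['x'] else line ++ ['.']) ([] : List Char)
      = (PySem.List.pyRange min_x max_x 1).map (fun x => if (x, y) ∈ positions then 'x' else '.') := by
    have : (fun (line : List Char) x =>
        if (x, y) ∈ positions then line ++ ['x'] else line ++ ['.'])
        = fun line x => line ++ [if (x, y) ∈ positions then 'x' else '.'] := by
      funext line x; split_ifs <;> rfl
    rw [this, PySem.List.foldl_append_singleton_eq_map]
    simp
  rw [hA, build_getD min_x max_x min_y max_y positions PySem.Dict.empty y hy1 hy2]
  have hempty : (PySem.Dict.empty : PySem.Dict Int (List Int)).getD y [] = [] := rfl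
  rw [hempty, List.nil_append]
  apply List.ext_getElem?
  intro i
  by_cases hi : i < (max_x - min_x).toNat
  · rw [scatter_getElem? min_x max_x _
        (by intro x hx; simp only [List.mem_map, List.mem_filter, decide_eq_true_eq] at hx
            obtain ⟨p, ⟨_, _, h1, h2⟩, hf⟩ := hx; exact ⟨hf ▸ h1, hf ▸ h2⟩)
        _ i (by simp) hi,
        List.getElem?_map, PySem.List.getElem?_pyRange_one]
    rw [if_pos (by simpa [PySem.List.length_pyRange_one] using hi)]
    simp only [mem_grouped min_x max_x positions y (min_x + (i : Int)) (by omega) (by omega)]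
    by_cases hmem : (min_x + (i : Int), y) ∈ positions
    · simp [hmem]
    · simp [hmem, hi]
  · rw [List.getElem?_eq_none, List.getElem?_eq_none]
    · have hx : ∀ x ∈ (positions.filter (fun p => decide (p.2 = y ∧ min_x ≤ p.1 ∧ p.1 < max_x))).map Prod.fst,
          min_x ≤ x ∧ x < max_x := by
        intro x hx; simp only [List.mem_map, List.mem_filter, decide_eq_true_eq] at hx
        obtain ⟨p, ⟨_, _, h1, h2⟩, hf⟩ := hx; exact ⟨hf ▸ h1, hf ▸ h2⟩
      have hlen : ∀ (xs : List Int) (r : List Char),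
          (xs.foldl (fun row x => row.set (x - min_x).toNat 'x') r).length = r.length := by
        intro xs; induction xs with
        | nil => intro r; rfl
        | cons x xs ih => intro r; simp only [List.foldl_cons]; rw [ih]; simp
      rw [hlen]; simpa using hi
    · simpa [PySem.List.length_pyRange_one] using hi

-- ===== VERDICT (by name: the statement is the Claim_ definition above) =====
theorem ext_pos_to_string_spec : Claim_equal_ext_pos_to_string := by
  intro positions min_x max_x min_y max_y _
  unfold Spec_ext_pos_to_string ext_pos_to_string ext_pos_to_string_alt
  rw [PySem.List.foldl_append_singleton_eq_map, PySem.List.foldl_append_singleton_eq_map]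
  simp only [List.nil_append]
  apply List.map_congr_left
  intro y hy
  rw [PySem.List.mem_pyRange_one] at hy
  rw [row_eq positions min_x max_x min_y max_y y hy.1 hy.2]
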